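-- pv_equiv track=rewrite | github.com/Kyuwony/Coding-test | 프로그래머스/0/181932. 코드 처리하기/코드 처리하기.py | solution
-- ===== SOURCE A (Python) =====
-- def solution(code):
--     mode = 0;
--     ret = ""
--     for idx in range(0, len(code)):
--         if code[idx] == '1':
--             mode = 1 - mode
--             continue
--
--         ret += code[idx] if idx % 2 - mode == 0 else ''
--     return ret if ret != "" else "EMPTY"
-- ===== SOURCE B (Python) =====
-- def solution(code):
--     counts = [0]
--     for ch in code:
--         counts.append(counts[-1] + (ch == '1'))
--     kept = ''.join(ch for i, ch in enumerate(code)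
--                    if ch != '1' and i % 2 == counts[i] % 2)
--     return kept or "EMPTY"
-- ===== Notes on version B (the rewrite author's own statement) =====
-- stated objective: alternative
-- what changed: Replaces the inline mutable mode toggle with a precomputed exclusive prefix-count table of the toggle character, then selects characters by a stateless per-index parity test in a comprehension.
import Mathlib
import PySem

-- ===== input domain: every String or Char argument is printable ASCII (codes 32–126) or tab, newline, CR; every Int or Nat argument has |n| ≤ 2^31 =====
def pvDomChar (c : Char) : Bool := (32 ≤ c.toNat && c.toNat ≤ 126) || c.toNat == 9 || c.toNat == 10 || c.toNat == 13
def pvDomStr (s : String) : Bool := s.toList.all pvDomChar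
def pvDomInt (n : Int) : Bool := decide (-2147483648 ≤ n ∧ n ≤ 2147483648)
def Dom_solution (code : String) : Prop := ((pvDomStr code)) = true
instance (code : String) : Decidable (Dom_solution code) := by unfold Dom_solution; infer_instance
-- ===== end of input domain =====

-- B replaces A's inline mutable mode toggle by a precomputed exclusive prefix count of '1's
-- consulted positionally (alternative decomposition, same cost).

-- ===== PORT A =====
-- fold over the indexed characters carrying (mode, ret), exactly A's loop
def solution (code : String) : String :=
  let st := (code.toList.zipIdx 0).foldl
    (fun (st : Int × List Char) p =>
      if p.1 = '1' then (1 - st.1, st.2)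
      else if (p.2 : Int) % 2 - st.1 = 0 then (st.1, st.2 ++ [p.1]) else (st.1, st.2))
    (0, [])
  if st.2 ≠ [] then String.mk st.2 else "EMPTY"

-- ===== PORT B =====
-- counts: exclusive prefix counts of '1', built by the same append loop as Source B
def bCounts (l : List Char) : List Int :=
  (l.foldl (fun (st : List Int × Int) ch =>
      (st.1 ++ [st.2], st.2 + (if ch = '1' then 1 else 0))) ([], 0)).1

def solution_alt (code : String) : String :=
  let cs := code.toList
  let kept := ((cs.zip (bCounts cs)).zipIdx 0).filterMap
    (fun p => if p.1.1 ≠ '1' ∧ (p.2 : Int) % 2 = p.1.2 % 2 then some p.1.1 else none)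
  if kept ≠ [] then String.mk kept else "EMPTY"

-- ===== PRECONDITION & SPEC =====
def Spec_solution (code : String) (out : String) : Prop := out = solution_alt code
instance (code : String) (out : String) : Decidable (Spec_solution code out) := by unfold Spec_solution; infer_instance

-- ===== CLAIM (what is proved, stated in full; the proofs are below) =====
def Claim_equal_solution : Prop := ∀ (code : String), Dom_solution code → Spec_solution code (solution code)

-- ===== LEMMAS AND PROOFS =====

-- spine form of the exclusive prefix counts
def countsFrom (c : Int) : List Char → List Int
  | [] => []
  | ch :: t => c :: countsFrom (c + (if ch = '1' then 1 else 0)) t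

theorem bCounts_aux (l : List Char) (acc : List Int) (c : Int) :
    (l.foldl (fun (st : List Int × Int) ch =>
      (st.1 ++ [st.2], st.2 + (if ch = '1' then 1 else 0))) (acc, c)).1
      = acc ++ countsFrom c l := by
  induction l generalizing acc c with
  | nil => simp [countsFrom]
  | cons ch t ih => simp [List.foldl, countsFrom, ih]

theorem bCounts_eq (l : List Char) : bCounts l = countsFrom 0 l := by
  simpa using bCounts_aux l [] 0

theorem main_lemma (l : List Char) (i0 : Nat) (c : Int) (acc : List Char)
    (hc : 0 ≤ c) :
    ((l.zipIdx i0).foldl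
      (fun (st : Int × List Char) p =>
        if p.1 = '1' then (1 - st.1, st.2)
        else if (p.2 : Int) % 2 - st.1 = 0 then (st.1, st.2 ++ [p.1]) else (st.1, st.2))
      (c % 2, acc)).2
    = acc ++ ((l.zip (countsFrom c l)).zipIdx i0).filterMap
        (fun p => if p.1.1 ≠ '1' ∧ (p.2 : Int) % 2 = p.1.2 % 2 then some p.1.1 else none) := by
  induction l generalizing i0 c acc with
  | nil => simp
  | cons ch t ih =>
    by_cases h1 : ch = '1'
    · subst h1
      have hmode : 1 - c % 2 = (c + 1) % 2 := by omega
      simp [countsFrom, List.zipIdx, hmode, ih (i0 + 1) (c + 1) acc (by omega)]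
    · by_cases h2 : (i0 : Int) % 2 = c % 2
      · simp [countsFrom, List.zipIdx, h1, h2,
          ih (i0 + 1) c (acc ++ [ch]) hc]
      · simp [countsFrom, List.zipIdx, h1, h2,
          show ¬ ((i0 : Int) % 2 - c % 2 = 0) by omega, ih (i0 + 1) c acc hc]

-- ===== VERDICT (by name: the statement is the Claim_ definition above) =====
theorem solution_spec : Claim_equal_solution := by
  intro code _
  unfold Spec_solution solution solution_alt
  dsimp only
  rw [bCounts_eq]
  have h := main_lemma code.toList 0 0 [] le_rfl
  norm_num at h
  rw [h]
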